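-- pv_equiv track=rewrite | github.com/kyuhyongpark/boolmore | networkmutation/conversions.py | prime2rr
-- ===== SOURCE A (Python) =====
-- def prime2rr(prime:list[list[dict[str,int]]], regulators:tuple[str] | None = None, signs:str | None = None):
--     """
--     Returns the representation of the rule of a node
--     when given the prime implicants of that rule.
--
--     Parameters
--     ----------
--     prime : list of list of dictionaries
--         prime implicants of the rule
--     regulators : tuple of strings
--         the regulating nodes
--     signs : length N binary str
--         represents signs of regulators. 0 means negation of the node
--
--     Returns
--     -------
--     regulators : tuple of strings
--         the regulating nodes
--     rr : length 2^N binary str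
--         rule representation
--     signs : length N binary str
--         represents signs of regulators. 0 means negation of the node
--     """
--     # Get the tuple of the regulator nodes
--     if regulators == None:
--         nodes = set()
--         for dct in prime[1]:
--             nodes = nodes.union(set(dct.keys()))
--         nodes = list(nodes)
--         nodes.sort()
--         regulators = tuple(nodes)
--
--     # check if the node is a fixed node
--     if len(regulators) == 0:
--         signs = ''
--         if bool(prime[1]): # 1 implicant is not empty
--             rr = '1'
--         else:
--             rr = '0'
--         return regulators, rr, signs
--
--     # Get the rr and signs of the regulators
--     rr = ['0'] * (2**len(regulators))
--     if signs == None: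
--         signs = ['1'] * len(regulators)
--         for implicant in prime[1]:
--             # check whether certain node is inside
--             for i, node in enumerate(regulators):
--                 if node in implicant:
--                     if implicant[node] == 0:
--                         signs[i] = '0'
--         signs = ''.join(signs)
--     # Get a binary number that gives us the position of the implicant on the rr
--     # for every piece of rule that gives 1 to the regulated node,
--     for implicant in prime[1]:
--         bi = ''
--         # check whether certain node is inside
--         for i, node in enumerate(regulators):
--             if node in implicant:
--                 # if it exists, put 1
--                 bi += '1'
--             else:
--                 # if it does not exist, put 0
--                 bi += '0'
--         # put 1 on that position of the rr
--         rr[-int(bi, 2)-1] = '1'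
--
--     rr = ''.join(rr)
--
--     return regulators, rr, signs
-- ===== SOURCE B (Python) =====
-- def prime2rr(prime, regulators=None, signs=None):
--     implicants = prime[1]
--     if regulators is None:
--         regulators = tuple(sorted({k for d in implicants for k in d}))
--     n = len(regulators)
--     if n == 0:
--         return regulators, ('1' if implicants else '0'), ''
--     if signs is None:
--         signs = ''.join('0' if any(d.get(r) == 0 for d in implicants) else '1'
--                         for r in regulators)
--     ones = {int(''.join('1' if r in d else '0' for r in regulators), 2)
--             for d in implicants}
--     size = 2 ** n
--     rr = ''.join('1' if size - 1 - p in ones else '0' for p in range(size))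
--     return regulators, rr, signs
-- ===== Notes on version B (the rewrite author's own statement) =====
-- stated objective: idiomatic
-- what changed: rr is built in one generator pass over range(2**n) testing membership in a set of 'on' positions (and signs in one per-regulator pass with any()), instead of A's preallocated list mutated by negative-index assignments and its per-implicant signs mutation loop.
import Mathlib
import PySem

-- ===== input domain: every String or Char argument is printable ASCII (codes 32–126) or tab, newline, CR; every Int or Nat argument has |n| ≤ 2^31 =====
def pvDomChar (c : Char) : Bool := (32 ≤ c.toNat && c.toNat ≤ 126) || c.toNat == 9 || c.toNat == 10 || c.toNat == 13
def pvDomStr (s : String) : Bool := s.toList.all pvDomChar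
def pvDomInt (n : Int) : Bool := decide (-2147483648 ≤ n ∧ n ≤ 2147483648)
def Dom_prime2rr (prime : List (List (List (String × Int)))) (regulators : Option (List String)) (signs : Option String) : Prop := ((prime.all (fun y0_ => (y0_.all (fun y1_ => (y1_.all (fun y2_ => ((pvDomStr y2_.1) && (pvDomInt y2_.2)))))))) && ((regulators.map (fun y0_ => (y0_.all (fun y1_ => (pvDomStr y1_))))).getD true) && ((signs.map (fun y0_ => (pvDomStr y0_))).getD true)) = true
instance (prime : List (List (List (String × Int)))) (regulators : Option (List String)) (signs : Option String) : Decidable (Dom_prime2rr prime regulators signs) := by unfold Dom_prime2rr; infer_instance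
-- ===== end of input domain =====

-- B builds rr by one membership pass over all 2^n positions from a set of 'on' positions (and signs by a
-- per-regulator any() pass) instead of A's index-assignment loops; return values agree wherever A returns.

-- ===== PORT A =====

-- Python list assignment xs[i] = c (negative i counts from the end; out of range = IndexError, which
-- this program never reaches: the guard branch returning xs unchanged is only for totality).
def pyAssign (xs : List Char) (i : Int) (c : Char) : List Char :=
  let j : Int := if i < 0 then i + xs.length else i
  if 0 ≤ j ∧ j < xs.length then xs.set j.toNat c else xs

-- nodes = set(); for dct in prime[1]: nodes = nodes.union(set(dct.keys())); sorted tuple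
def aRegs (ds : List (List (String × Int))) : List String :=
  PySem.List.sorted
    (ds.foldl (fun s dct => PySem.Set.union s (PySem.Set.ofList (PySem.Dict.keys (PySem.Dict.mk dct))))
      PySem.Set.empty)
    (fun x => x) false

-- signs = ['1']*len(regulators); nested mutation loop; (''.join is String.ofList at the use site)
def aSigns (regs : List String) (ds : List (List (String × Int))) : List Char :=
  ds.foldl (fun sl implicant =>
      (PySem.List.enumerate regs).foldl (fun sl p =>
        if PySem.Dict.contains (PySem.Dict.mk implicant) p.2 then
          if PySem.Dict.get? (PySem.Dict.mk implicant) p.2 = some 0 then pyAssign sl p.1 '0' else sl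
        else sl) sl)
    (List.replicate regs.length '1')

-- bi = ''; for i, node in enumerate(regulators): bi += '1' / '0'
def aBi (regs : List String) (implicant : List (String × Int)) : List Char :=
  (PySem.List.enumerate regs).foldl (fun bi p =>
    if PySem.Dict.contains (PySem.Dict.mk implicant) p.2 then bi ++ ['1'] else bi ++ ['0']) []

-- rr = ['0'] * 2**len(regulators); for implicant in prime[1]: rr[-int(bi,2)-1] = '1'
-- (int(bi, 2) never raises here — bi is a nonempty binary string — so the none branch is unreachable)
def aRR (regs : List String) (ds : List (List (String × Int))) : List Char :=
  ds.foldl (fun rr implicant =>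
      match PySem.Int.ofCharsBase? (aBi regs implicant) 2 with
      | some v => pyAssign rr (-v - 1) '1'
      | none => rr)
    (List.replicate (2 ^ regs.length) '0')

def prime2rr (prime : List (List (List (String × Int)))) (regulators : Option (List String)) (signs : Option String) : List String × String × String :=
  let implicants := (PySem.List.pyGet? prime 1).getD []   -- prime[1]; none = IndexError, excluded by Pre_
  let regs : List String :=
    match regulators with
    | none => aRegs implicants
    | some rs => rs
  if regs.length = 0 then
    (regs, (if implicants.isEmpty then "0" else "1"), "")
  else
    let signsOut : String :=
      match signs with
      | none => String.ofList (aSigns regs implicants)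
      | some s => s
    (regs, String.ofList (aRR regs implicants), signsOut)

-- ===== PORT B =====

-- sorted({k for d in prime[1] for k in d})
def bRegs (ds : List (List (String × Int))) : List String :=
  PySem.List.sorted
    (PySem.Set.ofList (ds.flatMap (fun d => PySem.Dict.keys (PySem.Dict.mk d))))
    (fun x => x) false

-- ''.join('0' if any(d.get(r) == 0 for d in implicants) else '1' for r in regulators)
def bSigns (regs : List String) (ds : List (List (String × Int))) : List Char :=
  regs.map (fun r =>
    if ds.any (fun d => PySem.Dict.get? (PySem.Dict.mk d) r == some 0) then '0' else '1')

-- ''.join('1' if r in d else '0' for r in regulators)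
def bBits (regs : List String) (d : List (String × Int)) : List Char :=
  regs.map (fun r => if PySem.Dict.contains (PySem.Dict.mk d) r then '1' else '0')

-- ones = {int(bits, 2) for d in implicants}   (int never raises here; none branch unreachable)
def bOnes (regs : List String) (ds : List (List (String × Int))) : PySem.Set Int :=
  ds.foldl (fun s d =>
      match PySem.Int.ofCharsBase? (bBits regs d) 2 with
      | some v => PySem.Set.add s v
      | none => s)
    PySem.Set.empty

-- ''.join('1' if size - 1 - p in ones else '0' for p in range(size))
def bRR (regs : List String) (ds : List (List (String × Int))) : List Char :=
  (PySem.List.pyRange 0 ((2 : Int) ^ regs.length)).map (fun p =>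
    if PySem.Set.contains (bOnes regs ds) ((2 : Int) ^ regs.length - 1 - p) then '1' else '0')

def prime2rr_alt (prime : List (List (List (String × Int)))) (regulators : Option (List String)) (signs : Option String) : List String × String × String :=
  let implicants := (PySem.List.pyGet? prime 1).getD []   -- prime[1]; none = IndexError, excluded by Pre_
  let regs : List String :=
    match regulators with
    | none => bRegs implicants
    | some rs => rs
  if regs.length = 0 then
    (regs, (if implicants.isEmpty then "0" else "1"), "")
  else
    let signsOut : String :=
      match signs with
      | none => String.ofList (bSigns regs implicants)
      | some s => s
    (regs, String.ofList (bRR regs implicants), signsOut)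

-- ===== PRECONDITION & SPEC =====

-- Python A evaluates prime[1]: it raises IndexError iff prime has fewer than two elements.
def Pre_prime2rr (prime : List (List (List (String × Int)))) (regulators : Option (List String)) (signs : Option String) : Prop :=
  2 ≤ prime.length
instance (prime : List (List (List (String × Int)))) (regulators : Option (List String)) (signs : Option String) : Decidable (Pre_prime2rr prime regulators signs) := by unfold Pre_prime2rr; infer_instance

def pvWitness_prime2rr : (List (List (List (String × Int)))) × Option (List String) × Option String :=
  ([[], [[("a", 1)], [("b", 0)]]], none, none)

def Spec_prime2rr (prime : List (List (List (String × Int)))) (regulators : Option (List String)) (signs : Option String) (out : List String × String × String) : Prop := out = prime2rr_alt prime regulators signs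
instance (prime : List (List (List (String × Int)))) (regulators : Option (List String)) (signs : Option String) (out : List String × String × String) : Decidable (Spec_prime2rr prime regulators signs out) := by unfold Spec_prime2rr; infer_instance

-- ===== CLAIM (what is proved, stated in full; the proofs are below) =====
def Claim_equal_prime2rr : Prop := ∀ (prime : List (List (List (String × Int)))) (regulators : Option (List String)) (signs : Option String), Dom_prime2rr prime regulators signs → Pre_prime2rr prime regulators signs → Spec_prime2rr prime regulators signs (prime2rr prime regulators signs)

-- ===== LEMMAS AND PROOFS =====

-- general fact: Set.add does not change membership tests at other values
lemma contains_add_eq (S : PySem.Set Int) (v x : Int) (hne : x ≠ v) :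
    PySem.Set.contains (PySem.Set.add S v) x = PySem.Set.contains S x := by
  by_cases hmem : x ∈ S
  · simp [PySem.Set.mem_add, hmem]
  · simp [PySem.Set.mem_add, hmem, hne]

-- membership and Nodup of A's regulator-set accumulation loop
lemma mem_nodup_regsFold (ds : List (List (String × Int))) (y : String) (s : PySem.Set String)
    (hs : s.Nodup) :
    (y ∈ ds.foldl (fun s dct => PySem.Set.union s (PySem.Set.ofList (PySem.Dict.keys (PySem.Dict.mk dct)))) s
      ↔ y ∈ s ∨ ∃ d ∈ ds, y ∈ PySem.Dict.keys (PySem.Dict.mk d))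
    ∧ (ds.foldl (fun s dct => PySem.Set.union s (PySem.Set.ofList (PySem.Dict.keys (PySem.Dict.mk dct)))) s).Nodup := by
  induction ds generalizing s with
  | nil => simpa using hs
  | cons d t ih =>
    simp only [List.foldl_cons]
    have h2 := ih (PySem.Set.union s (PySem.Set.ofList (PySem.Dict.keys (PySem.Dict.mk d))))
      (PySem.Set.nodup_union _ _ hs)
    rw [h2.1]
    refine ⟨?_, h2.2⟩
    simp only [PySem.Set.mem_union, PySem.Set.mem_ofList, List.mem_cons]
    constructor
    · rintro ((h|h)|⟨e,he,hy⟩)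
      · exact Or.inl h
      · exact Or.inr ⟨d, Or.inl rfl, h⟩
      · exact Or.inr ⟨e, Or.inr he, hy⟩
    · rintro (h|⟨e,(rfl|he),hy⟩)
      · exact Or.inl (Or.inl h)
      · exact Or.inl (Or.inr hy)
      · exact Or.inr ⟨e, he, hy⟩

lemma pyAssign_nonneg (xs : List Char) (k : Nat) (c : Char) (hk : k < xs.length) :
    pyAssign xs (k : Int) c = xs.set k c := by
  have h1 : ¬ ((k : Int) < 0) := by omega
  have h2 : (0:Int) ≤ (k:Int) ∧ (k:Int) < xs.length := by omega
  simp only [pyAssign, h1, if_false, h2, and_self, if_true, Int.toNat_natCast]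

lemma enum_cons {α : Type} (x : α) (t : List α) (k : Int) :
    PySem.List.enumerate (x :: t) k = (k, x) :: PySem.List.enumerate t (k + 1) := by
  simp [PySem.List.enumerate]

lemma take_set_succ (sl : List Char) (k : Nat) (c : Char) (hk : k < sl.length) :
    (sl.set k c).take (k+1) = sl.take k ++ [c] := by
  rw [List.take_add_one, List.take_set_of_le (Nat.le_refl k), List.getElem?_set_self']
  simp [List.getElem?_eq_getElem hk]

-- A's inner signs loop updates exactly the positions whose regulator maps to 0
lemma inner_fold (imp : List (String × Int)) (regs : List String) :
    ∀ (k : Nat) (sl : List Char), sl.length = k + regs.length →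
      (PySem.List.enumerate regs (k : Int)).foldl (fun sl p =>
          if PySem.Dict.contains (PySem.Dict.mk imp) p.2 then
            if PySem.Dict.get? (PySem.Dict.mk imp) p.2 = some 0 then pyAssign sl p.1 '0' else sl
          else sl) sl
        = sl.take k ++ List.zipWith (fun c r =>
            if PySem.Dict.get? (PySem.Dict.mk imp) r == some 0 then '0' else c) (sl.drop k) regs := by
  induction regs with
  | nil =>
    intro k sl hlen
    simp only [List.length_nil] at hlen
    simp [PySem.List.enumerate, List.take_of_length_le (by omega : sl.length ≤ k)]
  | cons r t ih =>
    intro k sl hlen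
    simp only [List.length_cons] at hlen
    rw [enum_cons, List.foldl_cons]
    have hk : k < sl.length := by omega
    have hdrop : sl.drop k = sl[k] :: sl.drop (k + 1) := List.drop_eq_getElem_cons hk
    have hsucc : (k : Int) + 1 = ((k+1 : Nat) : Int) := by push_cast; ring
    by_cases h0 : PySem.Dict.get? (PySem.Dict.mk imp) r = some 0
    · have hc : PySem.Dict.contains (PySem.Dict.mk imp) r = true := by
        rw [PySem.Dict.contains_eq_isSome_get?, h0]; rfl
      simp only [hc, h0, if_true]
      rw [pyAssign_nonneg sl k '0' hk]
      rw [hsucc, ih (k+1) (sl.set k '0') (by simp only [List.length_set]; omega)]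
      rw [hdrop]
      simp only [List.zipWith_cons_cons, h0]
      rw [take_set_succ sl k '0' hk, List.drop_set_of_lt (by omega)]
      simp
    · have hstep : (if PySem.Dict.contains (PySem.Dict.mk imp) r then
          if PySem.Dict.get? (PySem.Dict.mk imp) r = some 0 then pyAssign sl (k : Int) '0' else sl
          else sl) = sl := by
        by_cases hc : PySem.Dict.contains (PySem.Dict.mk imp) r <;> simp [hc, h0]
      rw [hstep]
      rw [hsucc, ih (k+1) sl (by omega)]
      rw [hdrop]
      simp only [List.zipWith_cons_cons]
      have hbe : (PySem.Dict.get? (PySem.Dict.mk imp) r == some 0) = false := by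
        simpa using h0
      rw [hbe]
      simp only [Bool.false_eq_true, if_false]
      rw [List.take_add_one, List.getElem?_eq_getElem hk]
      simp only [Option.toList_some, List.append_assoc, List.singleton_append]

lemma zipWith_map_self {α β : Type} (f : β → α → β) (g : α → β) (l : List α) :
    List.zipWith f (l.map g) l = l.map (fun r => f (g r) r) := by
  induction l with
  | nil => rfl
  | cons x t ih => simp [ih]

-- A's whole signs loop computes B's per-regulator test
lemma signs_fold (imps : List (List (String × Int))) (regs : List String) :
    ∀ g : String → Char,
      imps.foldl (fun sl implicant =>
          (PySem.List.enumerate regs).foldl (fun sl p =>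
            if PySem.Dict.contains (PySem.Dict.mk implicant) p.2 then
              if PySem.Dict.get? (PySem.Dict.mk implicant) p.2 = some 0 then pyAssign sl p.1 '0' else sl
            else sl) sl) (regs.map g)
        = regs.map (fun r =>
            if imps.any (fun d => PySem.Dict.get? (PySem.Dict.mk d) r == some 0) then '0' else g r) := by
  induction imps with
  | nil => intro g; simp
  | cons d t ih =>
    intro g
    rw [List.foldl_cons]
    have hstep := inner_fold d regs 0 (regs.map g) (by simp)
    simp only [Nat.cast_zero] at hstep
    rw [hstep]
    simp only [List.take_zero, List.drop_zero, List.nil_append]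
    rw [zipWith_map_self]
    rw [ih (fun r => if PySem.Dict.get? (PySem.Dict.mk d) r == some 0 then '0' else g r)]
    apply List.map_congr_left
    intro r _
    simp only [List.any_cons]
    by_cases h1 : PySem.Dict.get? (PySem.Dict.mk d) r == some 0 <;>
      by_cases h2 : t.any (fun d => PySem.Dict.get? (PySem.Dict.mk d) r == some 0) <;>
      simp [h1, h2]

-- int(s, 2) of a binary-digit string is never negative
lemma binchars_nonneg (cs : List Char) (h : ∀ c ∈ cs, c = '0' ∨ c = '1') (v : Int)
    (hv : PySem.Int.ofCharsBase? cs 2 = some v) : 0 ≤ v := by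
  have hns : ∀ c ∈ cs, PySem.Int.isIntSpace c = false := by
    intro c hc; rcases h c hc with rfl | rfl <;> decide
  have hd2 : List.dropWhile PySem.Int.isIntSpace cs = cs := by
    cases cs with
    | nil => simp
    | cons a t =>
      rw [List.dropWhile_cons_of_neg]
      simp [hns a (by simp)]
  have hd1 : List.dropWhile PySem.Int.isIntSpace cs.reverse = cs.reverse := by
    cases hr : cs.reverse with
    | nil => simp
    | cons a t =>
      rw [List.dropWhile_cons_of_neg]
      simp [hns a (by rw [← List.mem_reverse, hr]; simp)]
  unfold PySem.Int.ofCharsBase? at hv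
  rw [hd2, hd1, List.reverse_reverse, if_neg (by norm_num)] at hv
  cases cs with
  | nil =>
    simp only at hv
    split at hv
    · exact absurd hv (by simp)
    · simp at hv; omega
  | cons a t =>
    rcases h a (List.mem_cons_self) with rfl | rfl <;>
    · simp only at hv
      split at hv
      · exact absurd hv (by simp)
      · rw [if_neg (by simp)] at hv
        split at hv
        · next cs2 ds2 heq2 => simp at heq2
        · next cs2 ds2 heq2 => simp at heq2
        · simp at hv
          omega

lemma assign_mark (N : Nat) (S : PySem.Set Int) (v : Int) (hv : 0 ≤ v) :
    pyAssign ((List.range N).map (fun p : Nat =>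
        if PySem.Set.contains S ((N : Int) - 1 - (p : Int)) then '1' else '0')) (-v - 1) '1'
    = (List.range N).map (fun p : Nat =>
        if PySem.Set.contains (PySem.Set.add S v) ((N : Int) - 1 - (p : Int)) then '1' else '0') := by
  simp only [pyAssign, List.length_map, List.length_range]
  have hneg : (-v - 1 : Int) < 0 := by omega
  rw [if_pos hneg]
  by_cases hvN : v < N
  · rw [if_pos (by omega)]
    apply List.ext_getElem
    · simp
    · intro p hp hq
      simp only [List.length_map, List.length_range, List.length_set] at hp hq
      have hm : ((-v - 1 + (N : Int)).toNat) = N - 1 - v.toNat := by omega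
      simp only [List.getElem_set, hm, List.getElem_map, List.getElem_range]
      by_cases hpv : N - 1 - v.toNat = p
      · rw [if_pos hpv]
        have hx : ((N : Int) - 1 - p) = v := by omega
        rw [hx, if_pos (by simp [PySem.Set.mem_add])]
      · rw [if_neg hpv, contains_add_eq S v _ (by omega)]
  · rw [if_neg (by omega)]
    apply List.map_congr_left
    intro p hp
    rw [List.mem_range] at hp
    rw [contains_add_eq S v _ (by omega)]

-- A's position-assignment loop is B's membership map, for any marking function that yields
-- only nonnegative positions
lemma rr_fold_gen {β : Type} (N : Nat) (w : β → Option Int) (ds : List β)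
    (hw : ∀ d ∈ ds, ∀ v, w d = some v → 0 ≤ v) :
    ∀ S : PySem.Set Int,
      ds.foldl (fun rr d => match w d with
          | some v => pyAssign rr (-v - 1) '1'
          | none => rr)
        ((List.range N).map (fun p : Nat =>
          if PySem.Set.contains S ((N : Int) - 1 - (p : Int)) then '1' else '0'))
      = (List.range N).map (fun p : Nat =>
          if PySem.Set.contains (ds.foldl (fun s d => match w d with
              | some v => PySem.Set.add s v
              | none => s) S) ((N : Int) - 1 - (p : Int)) then '1' else '0') := by
  induction ds with
  | nil => intro S; rfl
  | cons d t ih =>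
    intro S
    rw [List.foldl_cons, List.foldl_cons]
    have hstep : (match w d with
        | some v => pyAssign ((List.range N).map (fun p : Nat =>
            if PySem.Set.contains S ((N : Int) - 1 - (p : Int)) then '1' else '0')) (-v - 1) '1'
        | none => (List.range N).map (fun p : Nat =>
            if PySem.Set.contains S ((N : Int) - 1 - (p : Int)) then '1' else '0'))
      = (List.range N).map (fun p : Nat =>
          if PySem.Set.contains (match w d with
              | some v => PySem.Set.add S v
              | none => S) ((N : Int) - 1 - (p : Int)) then '1' else '0') := by
      cases hwd : w d with
      | none => rfl
      | some v => exact assign_mark N S v (hw d (by simp) v hwd)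
    rw [hstep]
    exact ih (fun e he v hv => hw e (List.mem_cons_of_mem _ he) v hv) _

lemma replicate_eq_map_range (N : Nat) :
    (List.replicate N '0')
      = (List.range N).map (fun p : Nat =>
          if PySem.Set.contains (PySem.Set.empty (α := Int)) ((N : Int) - 1 - (p : Int)) then '1' else '0') := by
  have h : ∀ p : Nat, (if PySem.Set.contains (PySem.Set.empty (α := Int)) ((N : Int) - 1 - (p : Int)) then '1' else '0') = '0' := by
    intro p; rfl
  simp only [h, List.map_const', List.length_range]

lemma regs_eq (ds : List (List (String × Int))) : aRegs ds = bRegs ds := by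
  unfold aRegs bRegs
  apply PySem.List.sorted_eq_sorted_of_perm _ _ _ (fun a b h => h)
  rw [List.perm_ext_iff_of_nodup ((mem_nodup_regsFold ds default PySem.Set.empty (by simp [PySem.Set.empty])).2) (PySem.Set.nodup_ofList _)]
  intro y
  rw [(mem_nodup_regsFold ds y PySem.Set.empty (by simp [PySem.Set.empty])).1]
  simp [PySem.Set.mem_ofList, PySem.Set.empty, List.mem_flatMap]

lemma signs_eq (regs : List String) (ds : List (List (String × Int))) :
    aSigns regs ds = bSigns regs ds := by
  unfold aSigns bSigns
  have hrep : List.replicate regs.length '1' = regs.map (fun _ => '1') := by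
    simp [List.map_const']
  rw [hrep, signs_fold ds regs (fun _ => '1')]

lemma bi_fold (c : String → Bool) (regs : List String) :
    ∀ (k : Int) (acc : List Char),
      (PySem.List.enumerate regs k).foldl (fun bi p => if c p.2 then bi ++ ['1'] else bi ++ ['0']) acc
        = acc ++ regs.map (fun r => if c r then '1' else '0') := by
  induction regs with
  | nil => intro k acc; simp [PySem.List.enumerate]
  | cons r t ih =>
    intro k acc
    rw [enum_cons, List.foldl_cons, ih]
    by_cases h : c r <;> simp [h]

lemma bi_eq (regs : List String) (d : List (String × Int)) : aBi regs d = bBits regs d := by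
  unfold aBi bBits
  rw [bi_fold (fun r => PySem.Dict.contains (PySem.Dict.mk d) r) regs 0 []]
  simp

lemma bBits_chars (regs : List String) (d : List (String × Int)) :
    ∀ c ∈ bBits regs d, c = '0' ∨ c = '1' := by
  intro c hc
  unfold bBits at hc
  rw [List.mem_map] at hc
  obtain ⟨r, _, hr⟩ := hc
  by_cases h : PySem.Dict.contains (PySem.Dict.mk d) r <;> simp [h] at hr <;> simp [← hr]

lemma rr_eq (regs : List String) (ds : List (List (String × Int))) :
    aRR regs ds = bRR regs ds := by
  unfold aRR bRR bOnes
  have hbi : ∀ rr (implicant : List (String × Int)),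
      (fun rr implicant => match PySem.Int.ofCharsBase? (aBi regs implicant) 2 with
        | some v => pyAssign rr (-v - 1) '1'
        | none => rr) rr implicant
      = (fun rr implicant => match PySem.Int.ofCharsBase? (bBits regs implicant) 2 with
        | some v => pyAssign rr (-v - 1) '1'
        | none => rr) rr implicant := by
    intro rr implicant; simp only [bi_eq]
  rw [funext (fun rr => funext (fun implicant => hbi rr implicant))]
  have hcast : ((2 : Int) ^ regs.length) = ((2 ^ regs.length : Nat) : Int) := by push_cast; ring
  rw [hcast, PySem.List.pyRange_zero_natCast, List.map_map]
  rw [replicate_eq_map_range (2 ^ regs.length)]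
  rw [rr_fold_gen (2 ^ regs.length) (fun d => PySem.Int.ofCharsBase? (bBits regs d) 2) ds
    (fun d _ v hv => binchars_nonneg (bBits regs d) (bBits_chars regs d) v hv) PySem.Set.empty]
  rfl

-- ===== VERDICT (by name: the statement is the Claim_ definition above) =====
theorem prime2rr_spec : Claim_equal_prime2rr := by
  intro prime regulators signs _ _
  show _ = _
  unfold prime2rr prime2rr_alt
  cases regulators with
  | none =>
      simp only [regs_eq, signs_eq, rr_eq]
  | some rs =>
      simp only [signs_eq, rr_eq]
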